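-- pv_equiv track=rewrite | github.com/eva-barczykowska/python_snippets | LS/101_109__110_119_all_problems/anagrams.py | anagram_difference
-- ===== SOURCE A (Python) =====
-- def anagram_difference(str1, str2):
--     if not str1 and not str2:
--         return 0
--
--     elif (str1 and not str2) or (str2 and not str1):
--         return 1
--
--     else:
--         dict1 = make_dict(str1)
--         total1 = sum(dict1.values())
--
--         dict2 = make_dict(str2)
--         total2 = sum(dict2.values())
--
--         common_keys = dict1.keys() & dict2.keys() # intersection # creates a set
--         dict3 = {key: min(dict1[key], dict2[key]) for key in common_keys}#
--         total3 = sum(dict3.values())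
--
--         half1 = abs(total1 - total3)
--         half2 = abs(total2 - total3)
--         return half1+half2
--
-- def make_dict(string):
--     dictionary = {}
--     for char in string:
--         dictionary[char] = dictionary.get(char, 0) + 1
--     return dictionary
-- ===== SOURCE B (Python) =====
-- def anagram_difference(str1, str2):
--     if not str1 and not str2:
--         return 0
--     elif (str1 and not str2) or (str2 and not str1):
--         return 1
--     else:
--         delta = {}
--         for ch in str1:
--             delta[ch] = delta.get(ch, 0) + 1
--         for ch in str2:
--             delta[ch] = delta.get(ch, 0) - 1
--         return sum(abs(v) for v in delta.values())
-- ===== Notes on version B (the rewrite author's own statement) =====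
-- stated objective: simpler
-- what changed: Keeps A's two guard clauses but replaces the two count dicts, three totals, key-set intersection, per-key minimum table and two abs-subtractions by one signed dict (+1 per char of str1, -1 per char of str2) whose absolute values are summed directly.
import Mathlib
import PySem

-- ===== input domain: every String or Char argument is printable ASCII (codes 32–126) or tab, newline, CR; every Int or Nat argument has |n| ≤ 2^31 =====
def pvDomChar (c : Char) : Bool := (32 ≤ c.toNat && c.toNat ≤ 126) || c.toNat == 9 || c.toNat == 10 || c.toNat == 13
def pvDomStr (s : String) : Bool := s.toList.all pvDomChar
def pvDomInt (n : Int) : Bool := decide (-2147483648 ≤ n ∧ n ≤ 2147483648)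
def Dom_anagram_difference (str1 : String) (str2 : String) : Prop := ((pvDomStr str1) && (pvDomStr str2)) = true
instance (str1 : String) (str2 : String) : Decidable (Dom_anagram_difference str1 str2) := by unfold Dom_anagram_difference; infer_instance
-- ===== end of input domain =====

-- B keeps A's two guard clauses but replaces A's two count dicts, totals, key-set
-- intersection and per-key minimum table by one signed count dict whose absolute
-- values are summed directly (simpler decomposition, same asymptotic cost).


-- ===== PORT A =====
-- make_dict: dictionary[char] = dictionary.get(char, 0) + 1 over the string's chars
def pvMakeDict (s : List Char) : PySem.Dict Char Int :=
  s.foldl (fun d c => d.insert c (d.getD c 0 + 1)) PySem.Dict.empty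

def anagram_difference (str1 : String) (str2 : String) : Int :=
  let s1 := str1.toList
  let s2 := str2.toList
  if s1 = [] ∧ s2 = [] then 0
  else if (s1 ≠ [] ∧ s2 = []) ∨ (s2 ≠ [] ∧ s1 = []) then 1
  else
    let dict1 := pvMakeDict s1
    let total1 := dict1.values.sum
    let dict2 := pvMakeDict s2
    let total2 := dict2.values.sum
    -- dict1.keys() & dict2.keys(): a set; Python's set iteration order is unspecified and
    -- only the SUM of dict3's values is used, so PySem.Set.inter (left operand's order) is exact here
    let common := PySem.Set.inter dict1.keys dict2.keys
    let dict3 := common.foldl (fun d k => d.insert k (min (dict1.getD k 0) (dict2.getD k 0))) PySem.Dict.empty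
    let total3 := dict3.values.sum
    let half1 := |total1 - total3|
    let half2 := |total2 - total3|
    half1 + half2

-- ===== PORT B =====
def anagram_difference_alt (str1 : String) (str2 : String) : Int :=
  let s1 := str1.toList
  let s2 := str2.toList
  if s1 = [] ∧ s2 = [] then 0
  else if (s1 ≠ [] ∧ s2 = []) ∨ (s2 ≠ [] ∧ s1 = []) then 1
  else
    let delta0 := s1.foldl (fun d c => d.insert c (d.getD c 0 + 1)) PySem.Dict.empty
    let delta := s2.foldl (fun d c => d.insert c (d.getD c 0 - 1)) delta0
    (delta.values.map (fun v => |v|)).sum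

-- ===== PRECONDITION & SPEC =====
def Spec_anagram_difference (str1 : String) (str2 : String) (out : Int) : Prop := out = anagram_difference_alt str1 str2
instance (str1 : String) (str2 : String) (out : Int) : Decidable (Spec_anagram_difference str1 str2 out) := by unfold Spec_anagram_difference; infer_instance

-- ===== CLAIM (what is proved, stated in full; the proofs are below) =====
def Claim_equal_anagram_difference : Prop := ∀ (str1 : String) (str2 : String), Dom_anagram_difference str1 str2 → Spec_anagram_difference str1 str2 (anagram_difference str1 str2)

-- ===== LEMMAS AND PROOFS =====

-- mirror of PySem.Dict.getD_foldl_insert_add_one for B's decrement loop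
theorem pv_getD_foldl_insert_sub_one (l : List Char) (d : PySem.Dict Char Int) (v : Char) :
    (l.foldl (fun d x => d.insert x (d.getD x 0 - 1)) d).getD v 0 = d.getD v 0 - l.count v := by
  induction l generalizing d with
  | nil => simp
  | cons x xs ih =>
      simp only [List.foldl_cons, ih, PySem.Dict.getD_insert, List.count_cons]
      by_cases h : v = x
      · simp only [h, beq_self_eq_true, if_true]
        push_cast; ring
      · simp only [beq_iff_eq, h, if_false,
          if_neg (show ¬x = v from fun e => h e.symm)]
        push_cast; ring

-- Σ over the distinct chars of s of |count in s1 - count in s2|, as a Finset sum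
theorem pv_B_eq (s1 s2 : List Char) :
    (((s2.foldl (fun d c => d.insert c (d.getD c 0 - 1))
        (s1.foldl (fun d c => d.insert c (d.getD c 0 + 1)) PySem.Dict.empty)).values.map
        (fun v => |v|)).sum)
      = ∑ k ∈ s1.toFinset ∪ s2.toFinset, |(s1.count k : Int) - s2.count k| := by
  rw [PySem.Dict.foldl_insert_getD_add_one_eq_counter]
  set delta := s2.foldl (fun d c => d.insert c (d.getD c 0 - 1)) (PySem.Dict.counter s1) with hdelta
  have hnd : delta.keys.Nodup := by
    rw [hdelta]
    exact PySem.Dict.nodup_keys_foldl_insert _ _ _ (PySem.Dict.nodup_keys_counter s1)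
  have hget : ∀ k, delta.getD k 0 = (s1.count k : Int) - s2.count k := by
    intro k
    rw [hdelta, pv_getD_foldl_insert_sub_one, PySem.Dict.getD_counter]
  have hftoF : delta.keys.toFinset = s1.toFinset ∪ s2.toFinset := by
    rw [hdelta, PySem.Dict.keys_foldl_insert, PySem.Dict.keys_counter]
    ext k
    simp [PySem.Set.mem_update, PySem.Set.mem_ofList]
  rw [PySem.Dict.values_eq_map_keys delta hnd 0, List.map_map,
    ← List.sum_toFinset _ hnd, hftoF]
  exact Finset.sum_congr rfl (fun k _ => by simp [hget k])

theorem pv_A_else_eq_B (s1 s2 : List Char) :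
    (let dict1 := pvMakeDict s1
     let total1 := dict1.values.sum
     let dict2 := pvMakeDict s2
     let total2 := dict2.values.sum
     let common := PySem.Set.inter dict1.keys dict2.keys
     let dict3 := common.foldl (fun d k => d.insert k (min (dict1.getD k 0) (dict2.getD k 0))) PySem.Dict.empty
     let total3 := dict3.values.sum
     |total1 - total3| + |total2 - total3|)
      = ((s2.foldl (fun d c => d.insert c (d.getD c 0 - 1))
          (s1.foldl (fun d c => d.insert c (d.getD c 0 + 1)) PySem.Dict.empty)).values.map
          (fun v => |v|)).sum := by
  rw [pv_B_eq]
  dsimp only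
  simp only [pvMakeDict, PySem.Dict.foldl_insert_getD_add_one_eq_counter]
  have hofl : ∀ s : List Char, (PySem.Set.ofList s).toFinset = s.toFinset := by
    intro s; ext k; simp [PySem.Set.mem_ofList]
  have hval : ∀ s : List Char,
      (PySem.Dict.counter s).values.sum = ∑ k ∈ s.toFinset, (s.count k : Int) := by
    intro s
    rw [PySem.Dict.values_eq_map_keys _ (PySem.Dict.nodup_keys_counter s) 0,
      PySem.Dict.keys_counter, ← List.sum_toFinset _ (PySem.Set.nodup_ofList s), hofl]
    exact Finset.sum_congr rfl (fun k _ => by rw [PySem.Dict.getD_counter])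
  -- the common-keys set and the min-table dict3
  set common := PySem.Set.inter (PySem.Dict.counter s1).keys (PySem.Dict.counter s2).keys with hcom
  have hndc : common.Nodup := by
    rw [hcom, PySem.Dict.keys_counter, PySem.Dict.keys_counter]
    exact PySem.Set.nodup_inter _ _ (PySem.Set.nodup_ofList s1)
  have hmemc : ∀ k, k ∈ common ↔ k ∈ s1 ∧ k ∈ s2 := by
    intro k
    rw [hcom, PySem.Dict.keys_counter, PySem.Dict.keys_counter, PySem.Set.mem_inter]
    simp [PySem.Set.mem_ofList]
  have hitems := PySem.Dict.items_foldl_insert_fresh common (fun k => k)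
    (fun k => min ((PySem.Dict.counter s1).getD k 0) ((PySem.Dict.counter s2).getD k 0))
    PySem.Dict.empty (fun a _ => PySem.Dict.contains_empty a) (by simpa using hndc)
  have hv3 : (common.foldl (fun d k =>
      d.insert k (min ((PySem.Dict.counter s1).getD k 0) ((PySem.Dict.counter s2).getD k 0)))
      PySem.Dict.empty).values.sum
      = ∑ k ∈ s1.toFinset ∩ s2.toFinset, min (s1.count k : Int) (s2.count k : Int) := by
    have hctoF : common.toFinset = s1.toFinset ∩ s2.toFinset := by
      ext k; simp [hmemc k]
    simp only [PySem.Dict.values, hitems]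
    have : PySem.Dict.empty.items = ([] : List (Char × Int)) := rfl
    rw [this, List.nil_append, List.map_map, ← List.sum_toFinset _ hndc, hctoF]
    exact Finset.sum_congr rfl (fun k _ => by
      simp [PySem.Dict.getD_counter])
  rw [hv3, hval s1, hval s2]
  -- pure Finset arithmetic over F := s1.toFinset ∪ s2.toFinset
  have hzero1 : ∀ k ∈ s1.toFinset ∪ s2.toFinset, k ∉ s1.toFinset → ((s1.count k : Int)) = 0 := by
    intro k _ hk
    simp [List.count_eq_zero_of_not_mem (by simpa using hk)]
  have hzero2 : ∀ k ∈ s1.toFinset ∪ s2.toFinset, k ∉ s2.toFinset → ((s2.count k : Int)) = 0 := by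
    intro k _ hk
    simp [List.count_eq_zero_of_not_mem (by simpa using hk)]
  have e1 : ∑ k ∈ s1.toFinset, (s1.count k : Int)
      = ∑ k ∈ s1.toFinset ∪ s2.toFinset, (s1.count k : Int) :=
    Finset.sum_subset Finset.subset_union_left hzero1
  have e2 : ∑ k ∈ s2.toFinset, (s2.count k : Int)
      = ∑ k ∈ s1.toFinset ∪ s2.toFinset, (s2.count k : Int) :=
    Finset.sum_subset Finset.subset_union_right hzero2
  have e3 : ∑ k ∈ s1.toFinset ∩ s2.toFinset, min (s1.count k : Int) (s2.count k : Int)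
      = ∑ k ∈ s1.toFinset ∪ s2.toFinset, min (s1.count k : Int) (s2.count k : Int) := by
    apply Finset.sum_subset (Finset.inter_subset_union)
    intro k hk hk2
    have h12 := Finset.mem_inter.not.mp hk2
    by_cases h1 : k ∈ s1.toFinset
    · have h2 : k ∉ s2.toFinset := fun h2 => h12 ⟨h1, h2⟩
      rw [hzero2 k hk h2]
      exact min_eq_right (Int.natCast_nonneg _)
    · rw [hzero1 k hk h1]
      exact min_eq_left (Int.natCast_nonneg _)
  rw [e1, e2, e3]
  have hle1 : ∑ k ∈ s1.toFinset ∪ s2.toFinset, min (s1.count k : Int) (s2.count k : Int)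
      ≤ ∑ k ∈ s1.toFinset ∪ s2.toFinset, (s1.count k : Int) :=
    Finset.sum_le_sum (fun k _ => min_le_left _ _)
  have hle2 : ∑ k ∈ s1.toFinset ∪ s2.toFinset, min (s1.count k : Int) (s2.count k : Int)
      ≤ ∑ k ∈ s1.toFinset ∪ s2.toFinset, (s2.count k : Int) :=
    Finset.sum_le_sum (fun k _ => min_le_right _ _)
  rw [abs_of_nonneg (sub_nonneg.mpr hle1), abs_of_nonneg (sub_nonneg.mpr hle2),
    ← Finset.sum_sub_distrib, ← Finset.sum_sub_distrib, ← Finset.sum_add_distrib]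
  refine Finset.sum_congr rfl (fun k _ => ?_)
  rcases le_total (s1.count k : Int) (s2.count k : Int) with h|h
  · rw [min_eq_left h, abs_of_nonpos (by omega), ]
    ring
  · rw [min_eq_right h, abs_of_nonneg (by omega)]
    ring

-- ===== VERDICT (by name: the statement is the Claim_ definition above) =====
theorem anagram_difference_spec : Claim_equal_anagram_difference := by
  intro str1 str2 _
  unfold Spec_anagram_difference anagram_difference anagram_difference_alt
  dsimp only
  split_ifs with h0 h1
  · rfl
  · rfl
  · exact pv_A_else_eq_B str1.toList str2.toList
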